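-- pv_equiv track=rewrite | github.com/JBT13/f_h_Python | Gagnaskipan/tima10/recursion2.py | elfish
-- ===== SOURCE A (Python) =====
-- def elfish(st:str):
--     if st[0] == "e":
--         return elfish(st[1:])
--
--     if st[0] == "l":
--         return elfish(st[1:])
--
--     if st[0] == "f":
--         return True
--
--     return False
-- ===== SOURCE B (Python) =====
-- def elfish(st: str):
--     i = 0
--     while st[i] in ('e', 'l'):
--         i += 1
--     return st[i] == 'f'
-- ===== Notes on version B (the rewrite author's own statement) =====
-- stated objective: alternative
-- what changed: Replaces the front-recursion on string slices by an explicit index-based while loop that skips the leading 'e'/'l' characters and tests the next character.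
import Mathlib
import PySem

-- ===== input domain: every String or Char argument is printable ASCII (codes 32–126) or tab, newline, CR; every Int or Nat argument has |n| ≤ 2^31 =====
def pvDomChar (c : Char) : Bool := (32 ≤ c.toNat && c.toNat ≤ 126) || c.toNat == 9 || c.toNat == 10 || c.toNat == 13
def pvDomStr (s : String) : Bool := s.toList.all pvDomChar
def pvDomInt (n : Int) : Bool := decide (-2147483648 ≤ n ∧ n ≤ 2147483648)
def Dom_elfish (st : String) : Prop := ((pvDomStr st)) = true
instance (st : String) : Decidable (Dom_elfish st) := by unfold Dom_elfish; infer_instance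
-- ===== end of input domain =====

-- B replaces A's recursion on string slices by an index-based loop; same values, same IndexError cases (excluded by Pre_).

-- ===== PORT A =====
-- A recurses on st[1:]; st[0] on the empty string raises IndexError, so the [] case
-- (value false here) is excluded by Pre_elfish.
def elfishGo : List Char → Bool
  | [] => false
  | c :: rest =>
    if c = 'e' then elfishGo rest
    else if c = 'l' then elfishGo rest
    else if c = 'f' then true
    else false

def elfish (st : String) : Bool := elfishGo st.toList

-- ===== PORT B =====
-- B's while loop over an index i; st[i] out of range (IndexError in Python) is the
-- none case (value false), excluded by Pre_elfish.
def elfishAltGo (l : List Char) (i : Nat) : Bool :=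
  match h : l[i]? with
  | some c => if c = 'e' ∨ c = 'l' then elfishAltGo l (i + 1) else decide (c = 'f')
  | none => false
termination_by l.length - i
decreasing_by
  have : i < l.length := by
    by_contra hlt
    simp [List.getElem?_eq_none (by omega : l.length ≤ i)] at h
  omega

def elfish_alt (st : String) : Bool := elfishAltGo st.toList 0

-- ===== PRECONDITION & SPEC =====
-- Pre_ excludes exactly the inputs on which A raises IndexError (strings with no
-- character outside the two skipped letters, including the empty string); B raises there too.
def Pre_elfish (st : String) : Prop := st.toList.any (fun c => !(c == 'e' || c == 'l')) = true
instance (st : String) : Decidable (Pre_elfish st) := by unfold Pre_elfish; infer_instance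
def pvWitness_elfish : String := "elf"

def Spec_elfish (st : String) (out : Bool) : Prop := out = elfish_alt st
instance (st : String) (out : Bool) : Decidable (Spec_elfish st out) := by unfold Spec_elfish; infer_instance

-- ===== CLAIM (what is proved, stated in full; the proofs are below) =====
def Claim_equal_elfish : Prop := ∀ (st : String), Dom_elfish st → Pre_elfish st → Spec_elfish st (elfish st)

-- ===== LEMMAS AND PROOFS =====
theorem elfishAltGo_eq_drop (l : List Char) (i : Nat) :
    elfishAltGo l i = elfishGo (l.drop i) := by
  induction i using elfishAltGo.induct (l := l) with
  | case1 i c h hin ih =>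
    have hi : i < l.length := by
      by_contra hlt
      simp [List.getElem?_eq_none (by omega : l.length ≤ i)] at h
    have hdrop : l.drop i = c :: l.drop (i + 1) := by
      rw [List.drop_eq_getElem_cons hi]
      simp_all
    rw [elfishAltGo, h, hdrop]
    rcases hin with he | hl
    · simp [elfishGo, he, ih]
    · by_cases he : c = 'e' <;> simp [elfishGo, he, hl, ih]
  | case2 i c h hnot =>
    have hi : i < l.length := by
      by_contra hlt
      simp [List.getElem?_eq_none (by omega : l.length ≤ i)] at h
    have hdrop : l.drop i = c :: l.drop (i + 1) := by
      rw [List.drop_eq_getElem_cons hi]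
      simp_all
    rw [not_or] at hnot
    rw [elfishAltGo, h, hdrop]
    by_cases hf : c = 'f' <;> simp [elfishGo, hnot.1, hnot.2, hf]
  | case3 i h =>
    have hi : l.length ≤ i := by
      by_contra hlt
      simp [List.getElem?_eq_getElem (by omega : i < l.length)] at h
    rw [elfishAltGo, h, List.drop_eq_nil_of_le hi]
    rfl

-- ===== VERDICT (by name: the statement is the Claim_ definition above) =====
theorem elfish_spec : Claim_equal_elfish := by
  intro st _ _
  unfold Spec_elfish elfish elfish_alt
  rw [elfishAltGo_eq_drop, List.drop_zero]
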